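-- pv_equiv track=rewrite | github.com/jtrinklein/advent-of-code | 2020/10/main.py | get_estimate
-- ===== SOURCE A (Python) =====
-- def get_tribonacci_number(n):
--     '''
--     function to generate tribonacci numbers
--     taken from: https://www.geeksforgeeks.org/tribonacci-numbers/
--     '''
--
--     #seed the algorithm
--     x = [0] * (n+3)
--     x[0] = 0
--     x[1] = 0
--     x[2] = 1
--
--     for i in range(3,n+3):
--         x[i] = x[i - 1] + x[i - 2] + x[i - 3]
--     return x[-1]
--
-- def get_estimate(diffs):
--     '''
--     take the list of diffs and:
--     - join them in a string
--     - replace 13 with 1,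
--     - remove all other 3s
--     - split into a list at ,
--     - make each entry the length of the string ex: ['1111','11'] -> [4,2]
--
--     using that list
--     - find the max group length
--     - for group lengths from 2 to max : (l)
--        - get the tribonacci number for the group length (t)
--        - get the number of groups with length l : (c)
--        keep a running product of (t) raised to the power of (c)
--     '''
--     regions = [len(x) for x in ''.join([str(x) for x in diffs]).replace('13', '1,').replace('3', '').split(',')]
--     total = 1
--
--     for i in range(2, max(regions)+1):
--         t = get_tribonacci_number(i)
--         c = regions.count(i)
--         total *= t**c
--
--     return total
-- ===== SOURCE B (Python) =====
-- def get_estimate(diffs):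
--     regions = [len(x) for x in ''.join([str(x) for x in diffs]).replace('13', '1,').replace('3', '').split(',')]
--     m = max(regions)
--     # precompute the tribonacci sequence once: trib[k] = T(k), T(0)=T(1)=0, T(2)=1
--     trib = [0, 0, 1]
--     for _ in range(m):
--         trib.append(trib[-1] + trib[-2] + trib[-3])
--     total = 1
--     for l in regions:
--         if l >= 2:
--             total *= trib[l + 2]
--     return total
-- ===== Notes on version B (the rewrite author's own statement) =====
-- stated objective: alternative
-- what changed: B builds the tribonacci table once by appending and multiplies it in a single pass over the region lengths, instead of A's loop over every length from 2 to max that rebuilds the whole tribonacci array from scratch and rescans the regions list with .count on each iteration.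
import Mathlib
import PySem

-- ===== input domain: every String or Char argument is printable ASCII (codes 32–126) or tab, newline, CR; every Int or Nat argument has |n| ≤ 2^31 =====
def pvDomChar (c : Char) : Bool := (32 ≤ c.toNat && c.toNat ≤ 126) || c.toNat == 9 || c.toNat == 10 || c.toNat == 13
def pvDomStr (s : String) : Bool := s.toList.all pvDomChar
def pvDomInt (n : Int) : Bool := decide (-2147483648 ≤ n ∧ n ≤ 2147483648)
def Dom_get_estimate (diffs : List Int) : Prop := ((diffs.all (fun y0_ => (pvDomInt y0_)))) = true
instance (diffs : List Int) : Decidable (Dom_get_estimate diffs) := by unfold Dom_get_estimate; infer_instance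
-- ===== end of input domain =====

-- B replaces A's per-length tribonacci regeneration and repeated regions.count scans by one
-- tribonacci table built once plus a single multiplication pass over the region lengths (objective: alternative).

-- ===== PORT A =====
-- helper of A: get_tribonacci_number(n) — fills the array x of n+3 entries and returns x[-1]
def get_tribonacci_number (n : Int) : Int :=
  let x := List.replicate (n + 3).toNat (0 : Int)
  let x := PySem.List.pySetD x 0 0
  let x := PySem.List.pySetD x 1 0
  let x := PySem.List.pySetD x 2 1
  let x := (PySem.List.pyRange 3 (n + 3) 1).foldl
      (fun x i => PySem.List.pySetD x i
        (PySem.List.pyGetD x (i - 1) 0 + PySem.List.pyGetD x (i - 2) 0 + PySem.List.pyGetD x (i - 3) 0)) x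
  PySem.List.pyGetD x (-1) 0


def get_estimate (diffs : List Int) : Int :=
  let regions := (PySem.Chars.splitOn
      (PySem.Chars.replace
        (PySem.Chars.replace (PySem.Chars.join [] (diffs.map PySem.Int.toChars)) ['1','3'] ['1',','])
        ['3'] [])
      [',']).map PySem.Chars.len
  -- max(regions): regions is never empty (split always yields at least one piece), so the getD default is never reached
  let m := (PySem.List.max? regions (fun y => y)).getD 0
  (PySem.List.pyRange 2 (m + 1) 1).foldl
    (fun total i => total * (get_tribonacci_number i) ^ (PySem.List.count regions i)) 1

-- ===== PORT B =====
def get_estimate_alt (diffs : List Int) : Int :=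
  let regions := (PySem.Chars.splitOn
      (PySem.Chars.replace
        (PySem.Chars.replace (PySem.Chars.join [] (diffs.map PySem.Int.toChars)) ['1','3'] ['1',','])
        ['3'] [])
      [',']).map PySem.Chars.len
  let m := (PySem.List.max? regions (fun y => y)).getD 0
  -- trib = [0,0,1]; for _ in range(m): trib.append(trib[-1]+trib[-2]+trib[-3])
  let trib := (List.range m.toNat).foldl
      (fun t _ => t ++ [PySem.List.pyGetD t (-1) 0 + PySem.List.pyGetD t (-2) 0 + PySem.List.pyGetD t (-3) 0])
      ([0, 0, 1] : List Int)
  regions.foldl (fun total l => if 2 ≤ l then total * PySem.List.pyGetD trib (l + 2) 0 else total) 1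

-- ===== PRECONDITION & SPEC =====
def Spec_get_estimate (diffs : List Int) (out : Int) : Prop := out = get_estimate_alt diffs
instance (diffs : List Int) (out : Int) : Decidable (Spec_get_estimate diffs out) := by unfold Spec_get_estimate; infer_instance

-- ===== CLAIM (what is proved, stated in full; the proofs are below) =====
def Claim_equal_get_estimate : Prop := ∀ (diffs : List Int), Dom_get_estimate diffs → Spec_get_estimate diffs (get_estimate diffs)

-- ===== LEMMAS AND PROOFS =====

-- the tribonacci sequence both programs compute: T 0 = T 1 = 0, T 2 = 1, T (k+3) = T (k+2) + T (k+1) + T k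
def pvT : Nat → Int
  | 0 => 0
  | 1 => 0
  | 2 => 1
  | (k + 3) => pvT (k + 2) + pvT (k + 1) + pvT k

-- invariant of A's array-filling loop: after j steps the first 3+j cells hold pvT, the rest are still 0
theorem trib_inv (N j : Nat) (hj : j ≤ N) :
    (PySem.List.pyRange 3 (3 + (j : Int)) 1).foldl
      (fun x i => PySem.List.pySetD x i
        (PySem.List.pyGetD x (i - 1) 0 + PySem.List.pyGetD x (i - 2) 0 + PySem.List.pyGetD x (i - 3) 0))
      ((List.range 3).map pvT ++ List.replicate N (0 : Int))
    = (List.range (3 + j)).map pvT ++ List.replicate (N - j) (0 : Int) := by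
  induction j with
  | zero =>
    rw [PySem.List.pyRange_one_eq_nil (by simp)]
    simp
  | succ k ih =>
    have hk : k ≤ N := by omega
    have hsplit : PySem.List.pyRange 3 (3 + ((k + 1 : Nat) : Int)) 1
        = PySem.List.pyRange 3 (3 + (k : Int)) 1 ++ [3 + (k : Int)] := by
      rw [show (3 + ((k + 1 : Nat) : Int)) = 3 + (k : Int) + 1 by push_cast; ring]
      exact PySem.List.pyRange_one_succ_right (by omega)
    rw [hsplit, List.foldl_append, ih hk]
    set s := (List.range (3 + k)).map pvT ++ List.replicate (N - k) (0 : Int) with hs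
    have hlen : s.length = N + 3 := by simp [hs]; omega
    simp only [List.foldl_cons, List.foldl_nil]
    have e1 : (3 + (k : Int)) - 1 = ((2 + k : Nat) : Int) := by push_cast; ring
    have e2 : (3 + (k : Int)) - 2 = ((1 + k : Nat) : Int) := by push_cast; ring
    have e3 : (3 + (k : Int)) - 3 = ((k : Nat) : Int) := by omega
    have hA : ((List.range (3 + k)).map pvT).length = 3 + k := by simp
    have gget : ∀ (p : Nat), p < 3 + k → PySem.List.pyGetD s ((p : Nat) : Int) 0 = pvT p := by
      intro p hp
      rw [PySem.List.pyGetD_natCast]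
      rw [hs, List.getD_eq_getElem _ _ (by simp; omega)]
      rw [List.getElem_append_left (by simpa [hA] using hp)]
      simp
    have g1 : PySem.List.pyGetD s ((3 + (k : Int)) - 1) 0 = pvT (2 + k) := by
      rw [e1]; exact gget _ (by omega)
    have g2 : PySem.List.pyGetD s ((3 + (k : Int)) - 2) 0 = pvT (1 + k) := by
      rw [e2]; exact gget _ (by omega)
    have g3 : PySem.List.pyGetD s ((3 + (k : Int)) - 3) 0 = pvT k := by
      rw [e3]; exact gget _ (by omega)
    rw [g1, g2, g3]
    have hset : PySem.List.pySetD s (3 + (k : Int)) (pvT (2 + k) + pvT (1 + k) + pvT k)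
        = (List.range (3 + (k + 1))).map pvT ++ List.replicate (N - (k + 1)) (0 : Int) := by
      rw [show (3 + (k : Int)) = ((3 + k : Nat) : Int) by push_cast; ring, PySem.List.pySetD_natCast]
      rw [hs]
      have hrep : List.replicate (N - k) (0 : Int) = 0 :: List.replicate (N - (k + 1)) 0 := by
        rw [show N - k = (N - (k + 1)) + 1 by omega, List.replicate_succ]
      rw [hrep]
      rw [List.set_append_right _ _ (by simp)]
      simp only [hA, Nat.sub_self, List.set_cons_zero]
      rw [show 3 + (k + 1) = (3 + k) + 1 by ring, List.range_succ, List.map_append]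
      have : pvT (2 + k) + pvT (1 + k) + pvT k = pvT (3 + k) := by
        rw [show 3 + k = k + 3 by ring, show 2 + k = k + 2 by ring, show 1 + k = k + 1 by ring, pvT]
      rw [this]
      simp
    rw [hset]

theorem tribA_eq (n : Int) (hn : 0 ≤ n) : get_tribonacci_number n = pvT (n.toNat + 2) := by
  obtain ⟨N, rfl⟩ := Int.eq_ofNat_of_zero_le hn
  show get_tribonacci_number (N : Int) = pvT ((N : Int).toNat + 2)
  simp only [get_tribonacci_number]
  have h3 : ((N : Int) + 3).toNat = N + 3 := by omega
  have hinit : PySem.List.pySetD (PySem.List.pySetD (PySem.List.pySetD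
        (List.replicate ((N : Int) + 3).toNat (0 : Int)) 0 0) 1 0) 2 1
      = (List.range 3).map pvT ++ List.replicate N (0 : Int) := by
    rw [h3]
    rw [show (0 : Int) = ((0 : Nat) : Int) from rfl, show (1 : Int) = ((1 : Nat) : Int) from rfl,
        show (2 : Int) = ((2 : Nat) : Int) from rfl]
    rw [PySem.List.pySetD_natCast, PySem.List.pySetD_natCast, PySem.List.pySetD_natCast]
    rw [show N + 3 = ((N + 1) + 1) + 1 by ring, List.replicate_succ, List.replicate_succ,
        List.replicate_succ]
    simp [List.set, List.range_succ, pvT]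
  rw [hinit]
  have hrange : (PySem.List.pyRange 3 ((N : Int) + 3) 1)
      = PySem.List.pyRange 3 (3 + (N : Int)) 1 := by rw [add_comm]
  rw [hrange, trib_inv N N le_rfl]
  rw [Nat.sub_self, List.replicate_zero, List.append_nil]
  have hlen : ((List.range (3 + N)).map pvT).length = 3 + N := by simp
  rw [PySem.List.pyGetD_neg_ofNat _ 1 0 (by omega) (by omega)]
  rw [List.getElem_map]
  congr 1
  · simp [hlen]; omega

-- B's table after m appends is the map of pvT over the first m+3 indices
theorem tribTable_eq (m : Nat) :
    (List.range m).foldl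
      (fun t _ => t ++ [PySem.List.pyGetD t (-1) 0 + PySem.List.pyGetD t (-2) 0 + PySem.List.pyGetD t (-3) 0])
      [0, 0, 1] = (List.range (m + 3)).map pvT := by
  induction m with
  | zero => simp [List.range_succ, pvT]
  | succ k ih =>
    rw [List.range_succ, List.foldl_append, ih]
    set s := (List.range (k + 3)).map pvT with hs
    have hlen : s.length = k + 3 := by simp [hs]
    have g1 : PySem.List.pyGetD s (-1) 0 = pvT (k + 2) := by
      rw [PySem.List.pyGetD_neg_ofNat s 1 0 (by omega) (by simp [hlen])]
      simp [hs]
    have g2 : PySem.List.pyGetD s (-2) 0 = pvT (k + 1) := by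
      rw [PySem.List.pyGetD_neg_ofNat s 2 0 (by omega) (by simp [hlen])]
      simp [hs]
    have g3 : PySem.List.pyGetD s (-3) 0 = pvT k := by
      rw [PySem.List.pyGetD_neg_ofNat s 3 0 (by omega) (by simp [hlen])]
      simp [hs]
    simp only [List.foldl_cons, List.foldl_nil, g1, g2, g3]
    rw [show k + 1 + 3 = (k + 3) + 1 by ring, List.range_succ, List.map_append]
    simp [pvT]
    exact hs

-- a multiplying foldl is the product of the mapped list
theorem foldl_mul_eq_prod {α : Type} (L : List α) (g : α → Int) (a : Int) :
    L.foldl (fun t x => t * g x) a = a * (L.map g).prod := by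
  induction L generalizing a with
  | nil => simp
  | cons x t ih => simp [List.foldl_cons, ih, mul_assoc]

theorem prod_map_pow_ite_single (I : List Int) (hn : I.Nodup) (a : Int) (f : Int → Int) (ha : a ∈ I) :
    (I.map (fun i => f i ^ (if a == i then 1 else 0))).prod = f a := by
  induction I with
  | nil => cases ha
  | cons x t ih =>
    rcases List.nodup_cons.mp hn with ⟨hx, hnt⟩
    by_cases hax : a = x
    · subst hax
      have : ∀ i ∈ t, f i ^ (if a == i then 1 else 0) = 1 := by
        intro i hi
        have : a ≠ i := fun h => hx (h ▸ hi)
        simp [this]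
      simp only [List.map_cons, List.prod_cons, beq_self_eq_true, if_pos trivial, pow_one]
      have h1 : (List.map (fun i => f i ^ if (a == i) = true then 1 else 0) t).prod = 1 := by
        apply List.prod_eq_one
        intro y hy
        rcases List.mem_map.mp hy with ⟨i, hi, rfl⟩
        have hne : a ≠ i := fun h => hx (h ▸ hi)
        simp [hne]
      rw [h1, mul_one]
    · have ha' : a ∈ t := by cases ha with | head => exact absurd rfl hax | tail _ h => exact h
      have hax' : (a == x) = false := beq_false_of_ne hax
      simp only [List.map_cons, List.prod_cons, hax', pow_zero, one_mul, Bool.false_eq_true,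
        if_false]
      exact ih hnt ha'

theorem prod_map_pow_ite_none (I : List Int) (a : Int) (f : Int → Int) (ha : a ∉ I) :
    (I.map (fun i => f i ^ (if a == i then 1 else 0))).prod = 1 := by
  apply List.prod_eq_one
  intro y hy
  rcases List.mem_map.mp hy with ⟨i, hi, rfl⟩
  have hne : a ≠ i := fun h => ha (h ▸ hi)
  simp [hne]

theorem prod_count_eq (rs : List Int) (f : Int → Int) (m : Int)
    (h : ∀ l ∈ rs, 0 ≤ l ∧ l ≤ m) :
    (List.map (fun i => f i ^ PySem.List.count rs i) (PySem.List.pyRange 2 (m + 1) 1)).prod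
      = (List.map (fun l => if 2 ≤ l then f l else 1) rs).prod := by
  induction rs with
  | nil =>
    simp only [List.map_nil, List.prod_nil]
    apply List.prod_eq_one
    intro y hy
    rcases List.mem_map.mp hy with ⟨i, _, rfl⟩
    simp [PySem.List.count]
  | cons a t ih =>
    have ha := h a (List.mem_cons_self)
    have ht : ∀ l ∈ t, 0 ≤ l ∧ l ≤ m := fun l hl => h l (List.mem_cons_of_mem _ hl)
    have hcnt : ∀ i : Int, PySem.List.count (a :: t) i = PySem.List.count t i + (if a == i then 1 else 0) := by
      intro i
      simp [PySem.List.count_eq, List.count_cons]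
    have hsplit : (List.map (fun i => f i ^ PySem.List.count (a :: t) i) (PySem.List.pyRange 2 (m + 1) 1)).prod
        = (List.map (fun i => f i ^ PySem.List.count t i) (PySem.List.pyRange 2 (m + 1) 1)).prod
          * (List.map (fun i => f i ^ (if a == i then 1 else 0)) (PySem.List.pyRange 2 (m + 1) 1)).prod := by
      rw [← List.prod_map_mul]
      apply congrArg
      apply List.map_congr_left
      intro i _
      rw [hcnt i, pow_add]
    rw [hsplit, ih ht, List.map_cons, List.prod_cons]
    by_cases h2 : 2 ≤ a
    · have hmem : a ∈ PySem.List.pyRange 2 (m + 1) 1 := by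
        rw [PySem.List.mem_pyRange_one]
        exact ⟨h2, by omega⟩
      rw [prod_map_pow_ite_single _ (PySem.List.nodup_pyRange_one _ _) _ _ hmem]
      simp [h2, mul_comm]
    · rw [prod_map_pow_ite_none]
      · simp [h2]
      · intro hmem
        rw [PySem.List.mem_pyRange_one] at hmem
        omega

theorem range_count_prod (rs : List Int) (f : Int → Int) (m : Int)
    (h : ∀ l ∈ rs, 0 ≤ l ∧ l ≤ m) :
    (PySem.List.pyRange 2 (m + 1) 1).foldl
        (fun total i => total * f i ^ (PySem.List.count rs i)) 1
      = rs.foldl (fun total l => if 2 ≤ l then total * f l else total) 1 := by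
  have hbody : rs.foldl (fun total l => if 2 ≤ l then total * f l else total) 1
      = rs.foldl (fun total l => total * (if 2 ≤ l then f l else 1)) 1 := by
    apply PySem.List.foldl_congr_mem
    intro acc x _
    split_ifs <;> simp
  rw [hbody, foldl_mul_eq_prod, foldl_mul_eq_prod, one_mul, one_mul]
  exact prod_count_eq rs f m h

theorem main_eq (diffs : List Int) : get_estimate diffs = get_estimate_alt diffs := by
  simp only [get_estimate, get_estimate_alt]
  set rs := (PySem.Chars.splitOn
      (PySem.Chars.replace
        (PySem.Chars.replace (PySem.Chars.join [] (diffs.map PySem.Int.toChars)) ['1','3'] ['1',','])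
        ['3'] [])
      [',']).map PySem.Chars.len with hrs
  set m := (PySem.List.max? rs (fun y => y)).getD 0 with hm
  have hb : ∀ l ∈ rs, 0 ≤ l ∧ l ≤ m := by
    intro l hl
    constructor
    · rcases List.mem_map.mp hl with ⟨p, _, rfl⟩
      rw [PySem.Chars.len_eq]
      exact Int.natCast_nonneg _
    · rcases hmax : PySem.List.max? rs (fun y => y) with _ | mm
      · rw [PySem.List.max?_eq_none_iff] at hmax
        rw [hmax] at hl
        cases hl
      · have := PySem.List.max?_isMax hmax l hl
        rw [hm, hmax]
        exact this
  set trib : List Int := (List.range m.toNat).foldl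
      (fun t _ => t ++ [PySem.List.pyGetD t (-1) 0 + PySem.List.pyGetD t (-2) 0 + PySem.List.pyGetD t (-3) 0])
      ([0, 0, 1] : List Int) with htrib
  have htab : trib = (List.range (m.toNat + 3)).map pvT := tribTable_eq m.toNat
  have hcongr : (PySem.List.pyRange 2 (m + 1) 1).foldl
      (fun total i => total * (get_tribonacci_number i) ^ (PySem.List.count rs i)) 1
    = (PySem.List.pyRange 2 (m + 1) 1).foldl
      (fun total i => total * (PySem.List.pyGetD trib (i + 2) 0) ^ (PySem.List.count rs i)) 1 := by
    apply PySem.List.foldl_congr_mem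
    intro acc i hi
    rw [PySem.List.mem_pyRange_one] at hi
    have h0 : (0 : Int) ≤ i := by omega
    have him : i ≤ m := by omega
    rw [tribA_eq i h0]
    have hidx : i + 2 = ((i.toNat + 2 : Nat) : Int) := by omega
    rw [hidx, PySem.List.pyGetD_natCast, htab,
        List.getD_eq_getElem _ _ (by simp; omega), List.getElem_map]
    congr 2
    simp
  rw [hcongr]
  exact range_count_prod rs (fun l => PySem.List.pyGetD trib (l + 2) 0) m hb

-- ===== VERDICT (by name: the statement is the Claim_ definition above) =====
theorem get_estimate_spec : Claim_equal_get_estimate := by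
  intro diffs _
  unfold Spec_get_estimate
  exact main_eq diffs
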